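-- pv_equiv track=rewrite | github.com/Tayba-abdullah/GROUP-13---CSElec-01a---Toss-of-coin | number-1-and-2.py | calculate_cumulative
-- ===== SOURCE A (Python) =====
-- def calculate_cumulative(flips_list):
--     heads_cum = []
--     tails_cum = []
--     h_count = 0
--     t_count = 0
--
--     for flip in flips_list:
--         if flip == 1:
--             h_count += 1
--         else:
--             t_count += 1
--
--         heads_cum.append(h_count)
--         tails_cum.append(t_count)
--
--     attempts = list(range(1, len(flips_list) + 1))
--     return attempts, heads_cum, tails_cum
-- ===== SOURCE B (Python) =====
-- def calculate_cumulative(flips_list):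
--     indicators = [1 if f == 1 else 0 for f in flips_list]
--     heads_cum = prefix_sums(indicators)
--     attempts = list(range(1, len(flips_list) + 1))
--     tails_cum = [a - h for a, h in zip(attempts, heads_cum)]
--     return attempts, heads_cum, tails_cum
--
--
-- def prefix_sums(xs):
--     out = [0] * len(xs)
--     total = 0
--     for i, x in enumerate(xs):
--         total += x
--         out[i] = total
--     return out
-- ===== Notes on version B (the rewrite author's own statement) =====
-- stated objective: alternative
-- what changed: B maps the flips to 0/1 indicators, takes their prefix sums (a preallocated running-sum pass) to get heads_cum, and derives tails_cum in a separate pass as attempt minus heads (heads+tails == attempt), instead of A's single loop maintaining two counters and appending to two lists.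
import Mathlib
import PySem

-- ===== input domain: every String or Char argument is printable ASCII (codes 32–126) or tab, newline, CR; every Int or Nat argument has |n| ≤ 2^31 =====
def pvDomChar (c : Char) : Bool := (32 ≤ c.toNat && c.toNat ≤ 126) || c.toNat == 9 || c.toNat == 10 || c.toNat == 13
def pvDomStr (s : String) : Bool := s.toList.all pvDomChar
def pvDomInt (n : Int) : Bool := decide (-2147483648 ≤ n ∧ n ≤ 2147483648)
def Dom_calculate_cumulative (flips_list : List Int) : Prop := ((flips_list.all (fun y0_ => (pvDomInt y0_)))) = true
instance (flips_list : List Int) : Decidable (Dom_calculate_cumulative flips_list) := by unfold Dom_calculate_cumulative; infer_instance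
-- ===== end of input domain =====

-- B maps flips to 0/1 indicators, takes their prefix sums for heads_cum, and
-- derives tails_cum as attempt - heads (objective: alternative decomposition).

-- ===== PORT A =====
-- A's loop state: (h_count, t_count, heads_cum, tails_cum)
def calculate_cumulative (flips_list : List Int) : List Int × List Int × List Int :=
  let s := flips_list.foldl
    (fun (st : Int × Int × List Int × List Int) flip =>
      let h := if flip == 1 then st.1 + 1 else st.1
      let t := if flip == 1 then st.2.1 else st.2.1 + 1
      (h, t, st.2.2.1 ++ [h], st.2.2.2 ++ [t]))
    (0, 0, [], [])
  let attempts := PySem.List.pyRange 1 ((flips_list.length : Int) + 1) 1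
  (attempts, s.2.2.1, s.2.2.2)

-- ===== PORT B =====
-- running-sum pass of Source B's prefix_sums, building the output front-to-back
def prefixSums (total : Int) : List Int → List Int
  | [] => []
  | x :: xs => (total + x) :: prefixSums (total + x) xs

def calculate_cumulative_alt (flips_list : List Int) : List Int × List Int × List Int :=
  let indicators := flips_list.map (fun f => if f == 1 then (1 : Int) else 0)
  let heads_cum := prefixSums 0 indicators
  let attempts := PySem.List.pyRange 1 ((flips_list.length : Int) + 1) 1
  let tails_cum := List.zipWith (fun a h => a - h) attempts heads_cum
  (attempts, heads_cum, tails_cum)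

-- ===== PRECONDITION & SPEC =====
def Spec_calculate_cumulative (flips_list : List Int) (out : List Int × List Int × List Int) : Prop := out = calculate_cumulative_alt flips_list
instance (flips_list : List Int) (out : List Int × List Int × List Int) : Decidable (Spec_calculate_cumulative flips_list out) := by unfold Spec_calculate_cumulative; infer_instance

-- ===== CLAIM (what is proved, stated in full; the proofs are below) =====
def Claim_equal_calculate_cumulative : Prop := ∀ (flips_list : List Int), Dom_calculate_cumulative flips_list → Spec_calculate_cumulative flips_list (calculate_cumulative flips_list)

-- ===== LEMMAS AND PROOFS =====

-- cumulative heads list starting from count h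
def headsFrom (h : Int) : List Int → List Int
  | [] => []
  | f :: rest => (h + if f == 1 then 1 else 0) :: headsFrom (h + if f == 1 then 1 else 0) rest

-- cumulative tails list starting from count t
def tailsFrom (t : Int) : List Int → List Int
  | [] => []
  | f :: rest => (t + if f == 1 then 0 else 1) :: tailsFrom (t + if f == 1 then 0 else 1) rest

def hLast (h : Int) : List Int → Int
  | [] => h
  | f :: rest => hLast (h + if f == 1 then 1 else 0) rest

def tLast (t : Int) : List Int → Int
  | [] => t
  | f :: rest => tLast (t + if f == 1 then 0 else 1) rest

theorem foldA_spec (flips : List Int) : ∀ (h t : Int) (hs ts : List Int),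
    flips.foldl
      (fun (st : Int × Int × List Int × List Int) flip =>
        let h := if flip == 1 then st.1 + 1 else st.1
        let t := if flip == 1 then st.2.1 else st.2.1 + 1
        (h, t, st.2.2.1 ++ [h], st.2.2.2 ++ [t]))
      (h, t, hs, ts)
    = (hLast h flips, tLast t flips, hs ++ headsFrom h flips, ts ++ tailsFrom t flips) := by
  induction flips with
  | nil => intro h t hs ts; simp [hLast, tLast, headsFrom, tailsFrom]
  | cons f rest ih =>
      intro h t hs ts
      simp only [List.foldl_cons]
      rw [show (if f == 1 then h + 1 else h) = h + (if f == 1 then 1 else 0) by split <;> omega,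
          show (if f == 1 then t else t + 1) = t + (if f == 1 then 0 else 1) by split <;> omega]
      rw [ih]
      simp [hLast, tLast, headsFrom, tailsFrom]

theorem prefixSums_headsFrom (flips : List Int) : ∀ (h : Int),
    prefixSums h (flips.map (fun f => if f == 1 then (1 : Int) else 0)) = headsFrom h flips := by
  induction flips with
  | nil => intro h; simp [prefixSums, headsFrom]
  | cons f rest ih =>
      intro h
      simp only [List.map_cons, prefixSums, headsFrom]
      rw [ih]

theorem zip_tails (flips : List Int) : ∀ (h t : Int),
    List.zipWith (fun a hc => a - hc)
      (PySem.List.pyRange (h + t + 1) (h + t + 1 + (flips.length : Int)) 1)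
      (headsFrom h flips)
    = tailsFrom t flips := by
  induction flips with
  | nil => intro h t; simp [headsFrom, tailsFrom]
  | cons f rest ih =>
      intro h t
      rw [PySem.List.pyRange_one_cons (by simp)]
      simp only [headsFrom, tailsFrom, List.zipWith_cons_cons]
      rw [List.cons_eq_cons]
      constructor
      · split <;> omega
      · have key : h + t + 1 + 1 = (h + (if f == 1 then 1 else 0)) + (t + (if f == 1 then 0 else 1)) + 1 := by
          split <;> omega
        have key2 : h + t + 1 + ((f :: rest).length : Int)
            = (h + (if f == 1 then 1 else 0)) + (t + (if f == 1 then 0 else 1)) + 1 + (rest.length : Int) := by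
          simp; split <;> omega
        rw [key, key2, ih]

-- ===== VERDICT (by name: the statement is the Claim_ definition above) =====
theorem calculate_cumulative_spec : Claim_equal_calculate_cumulative := by
  intro flips _
  unfold Spec_calculate_cumulative calculate_cumulative calculate_cumulative_alt
  simp only [foldA_spec, prefixSums_headsFrom, List.nil_append]
  have := zip_tails flips 0 0
  simp only [zero_add] at this
  rw [show (1 : Int) + (flips.length : Int) = (flips.length : Int) + 1 by ring] at this
  rw [this]
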